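-- pv_equiv track=rewrite | github.com/huydsai02/ITA-project | All old file/Old File/A.py | TakeExtraPath
-- ===== SOURCE A (Python) =====
-- def TakeExtraPath(dict_path, main_path):
--   list_consider = list(dict_path.keys())
--   dict_extra_path = {}
--   for point in list_consider:
--     extra_path = []
--     path = dict_path[point]
--     for _ in range(len(path) - 1, -1, -1):
--       if path[_] in main_path:
--         break
--       extra_path.insert(0, path[_])
--     if len(extra_path) > 0:
--       dict_extra_path[point] = extra_path
--   return dict_extra_path
-- ===== SOURCE B (Python) =====
-- def TakeExtraPath(dict_path, main_path):
--     main_set = set(main_path)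
--     result = {}
--     for point in dict_path:
--         path = dict_path[point]
--         cut = 0
--         for i, x in enumerate(path):
--             if x in main_set:
--                 cut = i + 1
--         if cut < len(path):
--             result[point] = path[cut:]
--     return result
-- ===== Notes on version B (the rewrite author's own statement) =====
-- stated objective: faster
-- what changed: A scans each path backwards with break, testing list membership in main_path for every element and building the segment with insert(0, .); B builds a set of main_path once, computes in one forward pass the cut index after the last main-path element, and returns the slice path[cut:].
import Mathlib
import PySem

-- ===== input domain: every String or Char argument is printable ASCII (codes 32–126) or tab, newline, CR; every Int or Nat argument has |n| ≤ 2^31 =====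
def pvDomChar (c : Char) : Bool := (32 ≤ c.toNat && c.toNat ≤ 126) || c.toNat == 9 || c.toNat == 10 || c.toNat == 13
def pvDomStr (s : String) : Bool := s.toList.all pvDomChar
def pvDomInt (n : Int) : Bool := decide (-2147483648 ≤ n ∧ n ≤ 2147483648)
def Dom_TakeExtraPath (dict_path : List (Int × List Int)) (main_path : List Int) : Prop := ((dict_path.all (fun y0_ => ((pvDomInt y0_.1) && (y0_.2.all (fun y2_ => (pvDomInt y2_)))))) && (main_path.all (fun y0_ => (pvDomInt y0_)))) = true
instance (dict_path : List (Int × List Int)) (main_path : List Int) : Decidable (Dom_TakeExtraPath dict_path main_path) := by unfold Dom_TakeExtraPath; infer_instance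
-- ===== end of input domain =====

-- B replaces A's backward scan-with-break and insert(0, ·) per path by a set of main_path,
-- a single forward pass computing the cut index, and one slice; measured faster in a timing run (set membership replaces the per-element list scan).


-- ===== PORT A =====
-- inner loop 'for _ in range(len(path)-1, -1, -1): if path[_] in main_path: break; extra_path.insert(0, path[_])':
-- the countdown of indices visits exactly path.reverse; 'break' stops the recursion; insert(0, e) is e :: extra.
def extraLoopA (main_path : List Int) : List Int → List Int → List Int
  | [], extra => extra
  | x :: rest, extra => if x ∈ main_path then extra else extraLoopA main_path rest (x :: extra)

def TakeExtraPath (dict_path : List (Int × List Int)) (main_path : List Int) : List (Int × List Int) :=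
  let d := PySem.Dict.mk dict_path
  let list_consider := d.keys
  (list_consider.foldl (fun acc point =>
      -- dict_path[point]: point is drawn from d.keys, so the lookup cannot raise; getD [] is exact here
      let path := (d.get? point).getD []
      let extra_path := extraLoopA main_path path.reverse []
      if extra_path.length > 0 then acc.insert point extra_path else acc)
    PySem.Dict.empty).items

-- ===== PORT B =====
def TakeExtraPath_alt (dict_path : List (Int × List Int)) (main_path : List Int) : List (Int × List Int) :=
  let main_set := PySem.Set.ofList main_path
  let d := PySem.Dict.mk dict_path
  (d.keys.foldl (fun result point =>
      -- dict_path[point]: point is drawn from d.keys, so the lookup cannot raise; getD [] is exact here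
      let path := (d.get? point).getD []
      let cut : Int := (PySem.List.enumerate path 0).foldl
        (fun cut p => if p.2 ∈ main_set then p.1 + 1 else cut) 0
      if cut < PySem.List.len path then result.insert point (PySem.List.slice path (some cut) none)
      else result)
    PySem.Dict.empty).items

-- ===== PRECONDITION & SPEC =====
def Spec_TakeExtraPath (dict_path : List (Int × List Int)) (main_path : List Int) (out : List (Int × List Int)) : Prop := out = TakeExtraPath_alt dict_path main_path
instance (dict_path : List (Int × List Int)) (main_path : List Int) (out : List (Int × List Int)) : Decidable (Spec_TakeExtraPath dict_path main_path out) := by unfold Spec_TakeExtraPath; infer_instance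

-- ===== CLAIM (what is proved, stated in full; the proofs are below) =====
def Claim_equal_TakeExtraPath : Prop := ∀ (dict_path : List (Int × List Int)) (main_path : List Int), Dom_TakeExtraPath dict_path main_path → Spec_TakeExtraPath dict_path main_path (TakeExtraPath dict_path main_path)

-- ===== LEMMAS AND PROOFS =====

-- A's loop builds (reversed takeWhile of the reversed path) in front of the accumulator.
theorem extraLoopA_eq (mp : List Int) (rev extra : List Int) :
    extraLoopA mp rev extra = (rev.takeWhile (fun x => !decide (x ∈ mp))).reverse ++ extra := by
  induction rev generalizing extra with
  | nil => simp [extraLoopA]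
  | cons x rest ih =>
    by_cases hx : x ∈ mp <;> simp [extraLoopA, hx, ih]

-- B's forward fold computes length − (length of the untouched tail).
theorem cut_eq (mp : List Int) (path : List Int) :
    (PySem.List.enumerate path 0).foldl
      (fun cut p => if p.2 ∈ PySem.Set.ofList mp then p.1 + 1 else cut) 0
    = (path.length : Int) - ((path.reverse.takeWhile (fun x => !decide (x ∈ mp))).length : Int) := by
  induction path using List.reverseRecOn with
  | nil => simp [PySem.List.enumerate]
  | append_singleton ys x ih =>
    rw [PySem.List.enumerate_append, List.foldl_append, ih]
    have hle := (List.takeWhile_prefix (l := ys.reverse) (fun x => !decide (x ∈ mp))).length_le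
    simp only [List.length_reverse] at hle
    by_cases hx : x ∈ mp <;> simp [PySem.Set.mem_ofList, hx]

theorem body_eq (mp : List Int) (path : List Int) :
    (fun (acc : PySem.Dict Int (List Int)) (point : Int) =>
      let extra_path := extraLoopA mp path.reverse []
      if extra_path.length > 0 then acc.insert point extra_path else acc)
    = (fun acc point =>
      let cut : Int := (PySem.List.enumerate path 0).foldl
        (fun cut p => if p.2 ∈ PySem.Set.ofList mp then p.1 + 1 else cut) 0
      if cut < PySem.List.len path then acc.insert point (PySem.List.slice path (some cut) none)
      else acc) := by
  funext acc point
  simp only [cut_eq, extraLoopA_eq, List.append_nil, PySem.List.len_eq]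
  set q : Int → Bool := fun x => !decide (x ∈ mp) with hq
  have hle := (List.takeWhile_prefix (l := path.reverse) q).length_le
  simp only [List.length_reverse] at hle
  have hcut : ((path.length : Int) - ((path.reverse.takeWhile q).length : Int))
      = (((path.length - (path.reverse.takeWhile q).length : Nat)) : Int) := by omega
  rw [hcut, PySem.List.slice_from_natCast]
  have hdrop : path.drop (path.length - (path.reverse.takeWhile q).length)
      = (path.reverse.takeWhile q).reverse := by
    have hlen : (path.reverse.dropWhile q).reverse.length = path.length - (path.reverse.takeWhile q).length := by
      have h2 : (path.reverse.takeWhile q).length + (path.reverse.dropWhile q).length = path.length := by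
        rw [← List.length_append, List.takeWhile_append_dropWhile, List.length_reverse]
      simp only [List.length_reverse]; omega
    have hpe : path = (path.reverse.dropWhile q).reverse ++ (path.reverse.takeWhile q).reverse := by
      rw [← List.reverse_append, List.takeWhile_append_dropWhile, List.reverse_reverse]
    rw [← hlen]
    calc path.drop (path.reverse.dropWhile q).reverse.length
        = ((path.reverse.dropWhile q).reverse ++ (path.reverse.takeWhile q).reverse).drop
            (path.reverse.dropWhile q).reverse.length := by rw [← hpe]
      _ = (path.reverse.takeWhile q).reverse := List.drop_left
  rw [hdrop]
  by_cases hpos : 0 < (path.reverse.takeWhile q).length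
  · rw [if_pos (by simpa using hpos), if_pos (by omega)]
  · rw [if_neg (by simpa using hpos), if_neg (by omega)]

-- ===== VERDICT (by name: the statement is the Claim_ definition above) =====
theorem TakeExtraPath_spec : Claim_equal_TakeExtraPath := by
  intro dict_path main_path _
  unfold Spec_TakeExtraPath TakeExtraPath TakeExtraPath_alt
  simp only []
  congr 1
  apply List.foldl_ext
  intro acc point _
  have := congrFun (congrFun (body_eq main_path
    (((PySem.Dict.mk dict_path).get? point).getD [])) acc) point
  simpa using this
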